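-- pv_equiv track=rewrite | github.com/nisheed2440/parseltongue | packages/director/parseltongue_director/director.py | _chapter_ordinal
-- ===== SOURCE A (Python) =====
-- _ONES = [
--     "", "One", "Two", "Three", "Four", "Five", "Six", "Seven", "Eight", "Nine",
--     "Ten", "Eleven", "Twelve", "Thirteen", "Fourteen", "Fifteen", "Sixteen",
--     "Seventeen", "Eighteen", "Nineteen",
-- ]
--
-- _TENS = ["", "", "Twenty", "Thirty", "Forty", "Fifty",
--          "Sixty", "Seventy", "Eighty", "Ninety"]
--
-- def _chapter_ordinal(n: int) -> str:
--     """Return the spoken ordinal form.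
--
--     Examples: 1 → 'One', 21 → 'Twenty-One', 100 → 'One Hundred',
--               115 → 'One Hundred Fifteen', 121 → 'One Hundred Twenty-One'.
--     """
--     if 1 <= n < 20:
--         return _ONES[n]
--     if n < 100:
--         tens, ones = divmod(n, 10)
--         return _TENS[tens] if ones == 0 else f"{_TENS[tens]}-{_ONES[ones]}"
--     if n < 1000:
--         hundreds, remainder = divmod(n, 100)
--         base = f"{_ONES[hundreds]} Hundred"
--         if remainder == 0:
--             return base
--         return f"{base} {_chapter_ordinal(remainder)}"
--     return str(n)
-- ===== SOURCE B (Python) =====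
-- _ONES = [
--     "", "One", "Two", "Three", "Four", "Five", "Six", "Seven", "Eight", "Nine",
--     "Ten", "Eleven", "Twelve", "Thirteen", "Fourteen", "Fifteen", "Sixteen",
--     "Seventeen", "Eighteen", "Nineteen",
-- ]
--
-- _TENS = ["", "", "Twenty", "Thirty", "Forty", "Fifty",
--          "Sixty", "Seventy", "Eighty", "Ninety"]
--
--
-- def _chapter_ordinal(n: int) -> str:
--     """Flat, non-recursive converter: peel the hundreds fragment first,
--     then append the below-100 fragment, and join front-to-back."""
--     if n >= 1000:
--         return str(n)
--     parts = []
--     if n >= 100: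
--         parts.append(_ONES[n // 100] + " Hundred")
--         n %= 100
--         if n == 0:
--             return parts[0]
--     if 1 <= n < 20:
--         parts.append(_ONES[n])
--     else:
--         t, o = divmod(n, 10)
--         parts.append(_TENS[t] if o == 0 else _TENS[t] + "-" + _ONES[o])
--     return " ".join(parts)
-- ===== Notes on version B (the rewrite author's own statement) =====
-- stated objective: simpler
-- what changed: Replaces A's recursive call on the sub-hundred remainder with a flat, non-recursive converter that peels the hundreds fragment, mutates n to the remainder, collects fragments in a list and joins them front-to-back.
-- outside the precondition, e.g. on _chapter_ordinal(-101): A raises IndexError, B raises IndexError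
import Mathlib
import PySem

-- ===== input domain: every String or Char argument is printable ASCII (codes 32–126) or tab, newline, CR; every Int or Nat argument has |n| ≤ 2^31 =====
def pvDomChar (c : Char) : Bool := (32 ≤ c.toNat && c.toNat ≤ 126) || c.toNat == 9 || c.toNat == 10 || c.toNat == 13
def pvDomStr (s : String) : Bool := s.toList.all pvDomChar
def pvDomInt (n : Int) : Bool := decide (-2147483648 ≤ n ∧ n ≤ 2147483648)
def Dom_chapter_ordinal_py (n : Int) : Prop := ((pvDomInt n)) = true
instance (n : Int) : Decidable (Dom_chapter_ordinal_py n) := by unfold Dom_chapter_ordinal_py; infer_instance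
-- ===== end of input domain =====

-- B replaces A's recursive call on the sub-hundred remainder by a flat fragment-list
-- converter joined front-to-back; objective: simpler (no recursion).

-- module-level constants _ONES and _TENS, shared by both ports
def pyONES : List String :=
  ["", "One", "Two", "Three", "Four", "Five", "Six", "Seven", "Eight", "Nine",
   "Ten", "Eleven", "Twelve", "Thirteen", "Fourteen", "Fifteen", "Sixteen",
   "Seventeen", "Eighteen", "Nineteen"]

def pyTENS : List String :=
  ["", "", "Twenty", "Thirty", "Forty", "Fifty",
   "Sixty", "Seventy", "Eighty", "Ninety"]

-- ===== PORT A =====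
-- list subscripts xs[i] are ported as PySem.List.pyGetD xs i "" — exact under
-- Pre_chapter_ordinal_py, which guarantees every subscript A takes is in range.
-- The recursion carries a structural fuel counter only so the kernel can reduce it:
-- the recursive call argument is n % 100 < 100 and is only made when n ≥ 100, so the
-- depth is at most 2 and the fuel-0 arm is unreachable; the steps are exactly A's.
def chapterAux : Nat → Int → String
  | 0, _ => ""  -- unreachable
  | fuel + 1, n =>
    if 1 ≤ n ∧ n < 20 then PySem.List.pyGetD pyONES n ""
    else if n < 100 then
      let tens := PySem.Int.floordiv n 10
      let ones := PySem.Int.mod n 10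
      if ones = 0 then PySem.List.pyGetD pyTENS tens ""
      else PySem.List.pyGetD pyTENS tens "" ++ "-" ++ PySem.List.pyGetD pyONES ones ""
    else if n < 1000 then
      let hundreds := PySem.Int.floordiv n 100
      let remainder := PySem.Int.mod n 100
      let base := PySem.List.pyGetD pyONES hundreds "" ++ " Hundred"
      if remainder = 0 then base
      else base ++ " " ++ chapterAux fuel remainder
    else PySem.Int.toStr n

def chapter_ordinal_py (n : Int) : String := chapterAux 2 n

-- ===== PORT B =====
-- the fragment appended by Source B's final `if 1 <= n < 20: … else: …` block
def pvLowFrag (n : Int) : String :=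
  if 1 ≤ n ∧ n < 20 then PySem.List.pyGetD pyONES n ""
  else
    let t := PySem.Int.floordiv n 10
    let o := PySem.Int.mod n 10
    if o = 0 then PySem.List.pyGetD pyTENS t ""
    else PySem.List.pyGetD pyTENS t "" ++ "-" ++ PySem.List.pyGetD pyONES o ""

def chapter_ordinal_py_alt (n : Int) : String :=
  if 1000 ≤ n then PySem.Int.toStr n
  else if 100 ≤ n then
    -- parts = [_ONES[n // 100] + " Hundred"]; n %= 100
    let parts := [PySem.List.pyGetD pyONES (PySem.Int.floordiv n 100) "" ++ " Hundred"]
    let m := PySem.Int.mod n 100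
    if m = 0 then PySem.List.pyGetD parts 0 ""        -- return parts[0]
    else PySem.Str.join " " (parts ++ [pvLowFrag m])  -- " ".join(parts)
  else PySem.Str.join " " ([] ++ [pvLowFrag n])

-- ===== PRECONDITION & SPEC =====
-- Pre_ excludes exactly n ≤ -101, where A's _TENS[tens] (tens = n // 10 ≤ -11) raises
-- IndexError; B raises the same IndexError there.
def Pre_chapter_ordinal_py (n : Int) : Prop := -100 ≤ n
instance (n : Int) : Decidable (Pre_chapter_ordinal_py n) := by unfold Pre_chapter_ordinal_py; infer_instance
def pvWitness_chapter_ordinal_py : Int := (121)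

def Spec_chapter_ordinal_py (n : Int) (out : String) : Prop := out = chapter_ordinal_py_alt n
instance (n : Int) (out : String) : Decidable (Spec_chapter_ordinal_py n out) := by unfold Spec_chapter_ordinal_py; infer_instance

-- ===== CLAIM (what is proved, stated in full; the proofs are below) =====
def Claim_equal_chapter_ordinal_py : Prop := ∀ (n : Int), Dom_chapter_ordinal_py n → Pre_chapter_ordinal_py n → Spec_chapter_ordinal_py n (chapter_ordinal_py n)

-- ===== LEMMAS AND PROOFS =====

theorem pv_join_one (x : String) : PySem.Str.join " " [x] = x := by
  simp [PySem.Str.join]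

theorem pv_join_two (a b : String) : PySem.Str.join " " [a, b] = a ++ " " ++ b := by
  simp [PySem.Str.join, PySem.Chars.join_cons_cons, PySem.Chars.join_singleton]
  have h : (' ' :: b.toList) = (" " ++ b).toList := by simp
  rw [h, String.ofList_toList, String.append_assoc]

-- below 100 (where A never recurses) A's body coincides with B's fragment builder
theorem pv_low_eq (fuel : Nat) (n : Int) (hf : fuel ≠ 0) (h : n < 100) :
    chapterAux fuel n = pvLowFrag n := by
  cases fuel with
  | zero => exact absurd rfl hf
  | succ fuel =>
    simp only [chapterAux, pvLowFrag]
    split_ifs <;> rfl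

-- one unfolding of A's port at its actual fuel
theorem pv_chapterAux_two (n : Int) : chapterAux 2 n =
    (if 1 ≤ n ∧ n < 20 then PySem.List.pyGetD pyONES n ""
     else if n < 100 then
       let tens := PySem.Int.floordiv n 10
       let ones := PySem.Int.mod n 10
       if ones = 0 then PySem.List.pyGetD pyTENS tens ""
       else PySem.List.pyGetD pyTENS tens "" ++ "-" ++ PySem.List.pyGetD pyONES ones ""
     else if n < 1000 then
       let hundreds := PySem.Int.floordiv n 100
       let remainder := PySem.Int.mod n 100
       let base := PySem.List.pyGetD pyONES hundreds "" ++ " Hundred"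
       if remainder = 0 then base
       else base ++ " " ++ chapterAux 1 remainder
     else PySem.Int.toStr n) := rfl

theorem pv_mod100_bounds (n : Int) : 0 ≤ PySem.Int.mod n 100 ∧ PySem.Int.mod n 100 < 100 := by
  have h1 : PySem.Int.mod n 100 = n % 100 := PySem.Int.mod_eq_emod_of_pos (by norm_num)
  have h2 := Int.emod_nonneg n (show (100:Int) ≠ 0 by norm_num)
  have h3 := Int.emod_lt_of_pos n (show (0:Int) < 100 by norm_num)
  omega

theorem pv_A_high (n : Int) (h1 : 100 ≤ n) (h2 : n < 1000) :
    chapterAux 2 n =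
      (if PySem.Int.mod n 100 = 0
       then PySem.List.pyGetD pyONES (PySem.Int.floordiv n 100) "" ++ " Hundred"
       else PySem.List.pyGetD pyONES (PySem.Int.floordiv n 100) "" ++ " Hundred" ++ " " ++
            chapterAux 1 (PySem.Int.mod n 100)) := by
  rw [pv_chapterAux_two, if_neg (by omega), if_neg (by omega), if_pos h2]

theorem pv_alt_high (n : Int) (h1 : 100 ≤ n) (h2 : n < 1000) :
    chapter_ordinal_py_alt n =
      (if PySem.Int.mod n 100 = 0
       then PySem.List.pyGetD pyONES (PySem.Int.floordiv n 100) "" ++ " Hundred"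
       else PySem.Str.join " "
         ([PySem.List.pyGetD pyONES (PySem.Int.floordiv n 100) "" ++ " Hundred"] ++
          [pvLowFrag (PySem.Int.mod n 100)])) := by
  unfold chapter_ordinal_py_alt
  rw [if_neg (by omega), if_pos (by omega)]
  rfl

-- ===== VERDICT (by name: the statement is the Claim_ definition above) =====
theorem chapter_ordinal_py_spec : Claim_equal_chapter_ordinal_py := by
  intro n _ hpre
  unfold Pre_chapter_ordinal_py at hpre
  unfold Spec_chapter_ordinal_py chapter_ordinal_py
  by_cases h1 : n < 100
  · rw [pv_low_eq 2 n (by omega) h1]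
    unfold chapter_ordinal_py_alt
    rw [if_neg (by omega), if_neg (by omega), List.nil_append, pv_join_one]
  · by_cases h2 : n < 1000
    · rw [pv_A_high n (by omega) h2, pv_alt_high n (by omega) h2]
      have hb := pv_mod100_bounds n
      by_cases hm : PySem.Int.mod n 100 = 0
      · rw [if_pos hm, if_pos hm]
      · rw [if_neg hm, if_neg hm, List.singleton_append, pv_join_two,
            pv_low_eq 1 (PySem.Int.mod n 100) (by omega) (by omega)]
    · rw [pv_chapterAux_two, if_neg (by omega), if_neg (by omega), if_neg (by omega)]
      unfold chapter_ordinal_py_alt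
      rw [if_pos (by omega)]
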